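-- pv_equiv track=rewrite | github.com/Chris0x88/spacelord | lib/tg_format.py | format_swap_pick_to
-- ===== SOURCE A (Python) =====
-- from typing import Dict, Any, List, Optional, Tuple
--
-- _THIN_SEP = "─ ─ ─ ─ ─ ─ ─ ─ ─ ─ ─ ─"
--
-- TRADEABLE_TOKENS = [
--     {"sym": "HBAR",     "id": "0.0.0",         "emoji": "⟐"},
--     {"sym": "USDC",     "id": "0.0.456858",     "emoji": "💵"},
--     {"sym": "USDC[hts]","id": "0.0.1055459",    "emoji": "💲"},
--     {"sym": "SAUCE",    "id": "0.0.731861",     "emoji": "🍕"},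
--     {"sym": "WBTC",     "id": "0.0.10082597",   "emoji": "₿"},
--     {"sym": "WETH",     "id": "0.0.9770617",    "emoji": "Ξ"},
--     {"sym": "HBARX",    "id": "0.0.834116",     "emoji": "⬟"},
-- ]
--
-- _SYM_EMOJI = {t["sym"]: t["emoji"] for t in TRADEABLE_TOKENS}
--
-- def format_swap_pick_to(from_sym: str, from_id: str) -> Tuple[str, Dict[str, Any]]:
--     """After picking 'From', pick 'To' token."""
--     from_emoji = _SYM_EMOJI.get(from_sym, "")
--     text = (
--         "💱 <b>Swap</b>  <i>Step 2/4</i>\n"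
--         f"{_THIN_SEP}\n\n"
--         f"  Selling: {from_emoji} <b>{_escape(from_sym)}</b>\n\n"
--         "<b>Buy token:</b>"
--     )
--     rows = []
--     row = []
--     for t in TRADEABLE_TOKENS:
--         if t["id"] == from_id:
--             continue  # Can't swap to same token
--         row.append({"text": f"{t['emoji']} {t['sym']}", "callback_data": f"st:{from_id}:{t['id']}"})
--         if len(row) == 3:
--             rows.append(row)
--             row = []
--     if row:
--         rows.append(row)
--     rows.append([
--         {"text": "↩ Back", "callback_data": "swap"},
--         {"text": "🏠 Menu", "callback_data": "menu"},
--     ])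
--     return text, {"inline_keyboard": rows}
--
-- def _escape(text: str) -> str:
--     return (
--         str(text)
--         .replace("&", "&amp;")
--         .replace("<", "&lt;")
--         .replace(">", "&gt;")
--     )
-- ===== SOURCE B (Python) =====
-- from typing import Dict, Any, Tuple
--
-- _THIN_SEP = "─ ─ ─ ─ ─ ─ ─ ─ ─ ─ ─ ─"
--
-- TRADEABLE_TOKENS = [
--     {"sym": "HBAR",     "id": "0.0.0",         "emoji": "⟐"},
--     {"sym": "USDC",     "id": "0.0.456858",     "emoji": "💵"},
--     {"sym": "USDC[hts]","id": "0.0.1055459",    "emoji": "💲"},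
--     {"sym": "SAUCE",    "id": "0.0.731861",     "emoji": "🍕"},
--     {"sym": "WBTC",     "id": "0.0.10082597",   "emoji": "₿"},
--     {"sym": "WETH",     "id": "0.0.9770617",    "emoji": "Ξ"},
--     {"sym": "HBARX",    "id": "0.0.834116",     "emoji": "⬟"},
-- ]
--
-- _SYM_EMOJI = {t["sym"]: t["emoji"] for t in TRADEABLE_TOKENS}
--
-- def _escape(text: str) -> str:
--     return (
--         str(text)
--         .replace("&", "&amp;")
--         .replace("<", "&lt;")
--         .replace(">", "&gt;")
--     )
--
-- def format_swap_pick_to(from_sym: str, from_id: str) -> Tuple[str, Dict[str, Any]]: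
--     """After picking 'From', pick 'To' token."""
--     from_emoji = _SYM_EMOJI.get(from_sym, "")
--     text = (
--         "💱 <b>Swap</b>  <i>Step 2/4</i>\n"
--         f"{_THIN_SEP}\n\n"
--         f"  Selling: {from_emoji} <b>{_escape(from_sym)}</b>\n\n"
--         "<b>Buy token:</b>"
--     )
--     buttons = [
--         {"text": f"{t['emoji']} {t['sym']}", "callback_data": f"st:{from_id}:{t['id']}"}
--         for t in TRADEABLE_TOKENS
--         if t["id"] != from_id
--     ]
--     rows = [buttons[i:i + 3] for i in range(0, len(buttons), 3)]
--     rows.append([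
--         {"text": "↩ Back", "callback_data": "swap"},
--         {"text": "🏠 Menu", "callback_data": "menu"},
--     ])
--     return text, {"inline_keyboard": rows}
-- ===== Notes on version B (the rewrite author's own statement) =====
-- stated objective: simpler
-- what changed: B builds a flat list of buttons with a filtered comprehension and slices it into rows of three, replacing A's running-row accumulator with its len==3 flush and trailing-row check.
import Mathlib
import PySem

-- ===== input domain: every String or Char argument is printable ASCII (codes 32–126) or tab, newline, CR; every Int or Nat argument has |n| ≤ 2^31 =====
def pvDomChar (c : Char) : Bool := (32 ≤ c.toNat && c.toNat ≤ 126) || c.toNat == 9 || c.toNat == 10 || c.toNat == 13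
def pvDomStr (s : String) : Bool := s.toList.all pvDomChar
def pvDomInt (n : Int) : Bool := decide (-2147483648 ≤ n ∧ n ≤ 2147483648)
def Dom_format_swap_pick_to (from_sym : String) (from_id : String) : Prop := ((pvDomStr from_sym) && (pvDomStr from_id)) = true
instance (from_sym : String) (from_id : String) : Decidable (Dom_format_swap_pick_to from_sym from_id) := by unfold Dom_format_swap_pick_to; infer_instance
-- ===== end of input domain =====

-- B replaces A's running-row accumulator (flush at len 3, trailing-row check) by a flat
-- filtered button list sliced into chunks of three; objective: simpler.

-- shared module-level context (constants and helpers of lib/tg_format.py)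
def pvTHIN_SEP : String := "─ ─ ─ ─ ─ ─ ─ ─ ─ ─ ─ ─"

def pvTOKENS : List (String × String × String) :=  -- (sym, id, emoji)
  [("HBAR", "0.0.0", "⟐"),
   ("USDC", "0.0.456858", "💵"),
   ("USDC[hts]", "0.0.1055459", "💲"),
   ("SAUCE", "0.0.731861", "🍕"),
   ("WBTC", "0.0.10082597", "₿"),
   ("WETH", "0.0.9770617", "Ξ"),
   ("HBARX", "0.0.834116", "⬟")]

def pvSYM_EMOJI : PySem.Dict String String :=
  pvTOKENS.foldl (fun d t => d.insert t.1 t.2.2) PySem.Dict.empty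

def pvEscape (text : String) : String :=
  PySem.Str.replace (PySem.Str.replace (PySem.Str.replace text "&" "&amp;") "<" "&lt;") ">" "&gt;"

def pvBackRow : List (List (String × String)) :=
  [[("text", "↩ Back"), ("callback_data", "swap")],
   [("text", "🏠 Menu"), ("callback_data", "menu")]]

-- ===== PORT A =====
def format_swap_pick_to (from_sym : String) (from_id : String) : String × (List (String × List (List (List (String × String))))) :=
  let from_emoji := pvSYM_EMOJI.getD from_sym ""
  let text := "💱 <b>Swap</b>  <i>Step 2/4</i>\n" ++ pvTHIN_SEP ++ "\n\n" ++
              "  Selling: " ++ from_emoji ++ " <b>" ++ pvEscape from_sym ++ "</b>\n\n" ++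
              "<b>Buy token:</b>"
  let st := pvTOKENS.foldl
    (fun (st : List (List (List (String × String))) × List (List (String × String))) t =>
      if t.2.1 == from_id then st
      else
        let row := st.2 ++ [[("text", t.2.2 ++ " " ++ t.1),
                             ("callback_data", "st:" ++ from_id ++ ":" ++ t.2.1)]]
        if row.length == 3 then (st.1 ++ [row], []) else (st.1, row))
    ([], [])
  let rows := if st.2.isEmpty then st.1 else st.1 ++ [st.2]
  let rows := rows ++ [pvBackRow]
  (text, [("inline_keyboard", rows)])

-- ===== PORT B =====
def format_swap_pick_to_alt (from_sym : String) (from_id : String) : String × (List (String × List (List (List (String × String))))) :=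
  let from_emoji := pvSYM_EMOJI.getD from_sym ""
  let text := "💱 <b>Swap</b>  <i>Step 2/4</i>\n" ++ pvTHIN_SEP ++ "\n\n" ++
              "  Selling: " ++ from_emoji ++ " <b>" ++ pvEscape from_sym ++ "</b>\n\n" ++
              "<b>Buy token:</b>"
  let buttons := (pvTOKENS.filter (fun t => t.2.1 != from_id)).map
    (fun t => [("text", t.2.2 ++ " " ++ t.1),
               ("callback_data", "st:" ++ from_id ++ ":" ++ t.2.1)])
  let rows := (PySem.List.pyRange 0 (buttons.length : Int) 3).map
    (fun i => PySem.List.slice buttons (some i) (some (i + 3)))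
  (text, [("inline_keyboard", rows ++ [pvBackRow])])

-- ===== PRECONDITION & SPEC =====
def Spec_format_swap_pick_to (from_sym : String) (from_id : String) (out : String × (List (String × List (List (List (String × String)))))) : Prop := out = format_swap_pick_to_alt from_sym from_id
instance (from_sym : String) (from_id : String) (out : String × (List (String × List (List (List (String × String)))))) : Decidable (Spec_format_swap_pick_to from_sym from_id out) := by
  unfold Spec_format_swap_pick_to
  haveI : DecidableEq (String × List (List (List (String × String)))) := inferInstance
  haveI : DecidableEq (List (String × List (List (List (String × String))))) := inferInstance
  infer_instance

-- ===== CLAIM (what is proved, stated in full; the proofs are below) =====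
def Claim_equal_format_swap_pick_to : Prop := ∀ (from_sym : String) (from_id : String), Dom_format_swap_pick_to from_sym from_id → Spec_format_swap_pick_to from_sym from_id (format_swap_pick_to from_sym from_id)

-- ===== LEMMAS AND PROOFS =====

-- ===== VERDICT (by name: the statement is the Claim_ definition above) =====
theorem format_swap_pick_to_spec : Claim_equal_format_swap_pick_to := by
  intro fs fid _
  unfold Spec_format_swap_pick_to
  by_cases h0 : fid = "0.0.0"
  · subst h0; rfl
  · by_cases h1 : fid = "0.0.456858"
    · subst h1; rfl
    · by_cases h2 : fid = "0.0.1055459"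
      · subst h2; rfl
      · by_cases h3 : fid = "0.0.731861"
        · subst h3; rfl
        · by_cases h4 : fid = "0.0.10082597"
          · subst h4; rfl
          · by_cases h5 : fid = "0.0.9770617"
            · subst h5; rfl
            · by_cases h6 : fid = "0.0.834116"
              · subst h6; rfl
              · have e0 : ¬ ("0.0.0" = fid) := Ne.symm h0
                have e1 : ¬ ("0.0.456858" = fid) := Ne.symm h1
                have e2 : ¬ ("0.0.1055459" = fid) := Ne.symm h2
                have e3 : ¬ ("0.0.731861" = fid) := Ne.symm h3
                have e4 : ¬ ("0.0.10082597" = fid) := Ne.symm h4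
                have e5 : ¬ ("0.0.9770617" = fid) := Ne.symm h5
                have e6 : ¬ ("0.0.834116" = fid) := Ne.symm h6
                simp [format_swap_pick_to, format_swap_pick_to_alt, pvTOKENS,
                      e0, e1, e2, e3, e4, e5, e6,
                      PySem.List.pyRange, PySem.List.slice,
                      PySem.List.clampIdx, List.range_succ]
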